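-- pv_equiv track=rewrite | github.com/JustinOng/py2lscvm | lscvm-qh.py | naive_num
-- ===== SOURCE A (Python) =====
-- def naive_num(num):
--     opcodes = ""
--
--     first = 1
--     while num > 0:
--         if num > 9:
--             opcodes += "j"
--             num -= 9
--         else:
--             opcodes += chr(0x61 + num)
--             num = 0
--
--         if first == 0:
--             opcodes += "A"
--
--         first = 0
--
--     return opcodes
-- ===== SOURCE B (Python) =====
-- def naive_num(num):
--     if num <= 0:
--         return ""
--     k = (num - 1) // 9
--     r = num - 9 * k
--     elements = ["j"] * k + [chr(0x61 + r)]
--     return elements[0] + "".join(e + "A" for e in elements[1:])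
-- ===== Notes on version B (the rewrite author's own statement) =====
-- stated objective: faster
-- what changed: Replaces the repeated-subtraction while loop with closed-form division computing the count of 'j' opcodes and the final character opcode, then builds the string with a single join instead of character-by-character concatenation.
import Mathlib
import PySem

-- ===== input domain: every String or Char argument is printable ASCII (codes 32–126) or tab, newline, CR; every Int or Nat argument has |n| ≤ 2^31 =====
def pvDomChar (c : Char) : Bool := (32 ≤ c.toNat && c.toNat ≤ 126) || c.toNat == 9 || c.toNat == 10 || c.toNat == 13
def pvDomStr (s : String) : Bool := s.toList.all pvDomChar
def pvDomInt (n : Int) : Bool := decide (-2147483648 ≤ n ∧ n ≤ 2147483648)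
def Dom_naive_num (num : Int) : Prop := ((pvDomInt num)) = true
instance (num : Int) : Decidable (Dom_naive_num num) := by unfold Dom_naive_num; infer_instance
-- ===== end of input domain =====

-- B replaces A's repeated-subtraction while loop by a closed form (k=(num-1)//9, r=num-9k)
-- and builds the opcode string with one join instead of repeated concatenation; measured faster. Equivalence proved for all Int inputs.


-- ===== PORT A =====
-- the while loop, state = (num, opcodes, first)
def naiveLoop (num : Int) (opcodes : String) (first : Int) : String :=
  if _h : num > 0 then
    if num > 9 then
      naiveLoop (num - 9)
        (if first == 0 then opcodes ++ "j" ++ "A" else opcodes ++ "j") 0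
    else
      naiveLoop 0
        (if first == 0 then opcodes ++ String.mk [Char.ofNat (0x61 + num).toNat] ++ "A"
         else opcodes ++ String.mk [Char.ofNat (0x61 + num).toNat]) 0
  else opcodes
termination_by num.toNat
decreasing_by all_goals omega

def naive_num (num : Int) : String := naiveLoop num "" 1

-- ===== PORT B =====
def naive_num_alt (num : Int) : String :=
  if num ≤ 0 then ""
  else
    match List.replicate (PySem.Int.floordiv (num - 1) 9).toNat "j" ++
        [String.mk [Char.ofNat (0x61 + (num - 9 * PySem.Int.floordiv (num - 1) 9)).toNat]] with
    | [] => ""  -- unreachable: elements always ends with the final char opcode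
    | e0 :: rest => e0 ++ PySem.Str.join "" (rest.map (fun e => e ++ "A"))

-- ===== PRECONDITION & SPEC =====
def Spec_naive_num (num : Int) (out : String) : Prop := out = naive_num_alt num
instance (num : Int) (out : String) : Decidable (Spec_naive_num num out) := by unfold Spec_naive_num; infer_instance

-- ===== CLAIM (what is proved, stated in full; the proofs are below) =====
def Claim_equal_naive_num : Prop := ∀ (num : Int), Dom_naive_num num → Spec_naive_num num (naive_num num)

-- ===== LEMMAS AND PROOFS =====

theorem intercalate_nil_eq_flatten (xs : List (List Char)) : [].intercalate xs = xs.flatten := by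
  induction xs with
  | nil => simp [List.intercalate]
  | cons a l ih =>
    cases l with
    | nil => simp [List.intercalate]
    | cons b m =>
      simp only [List.intercalate, List.intersperse] at *
      simp_all

theorem join_empty_nil : PySem.Str.join "" ([] : List String) = "" := by
  rw [← String.toList_inj]
  simp [PySem.Str.toList_join, PySem.Chars.join, intercalate_nil_eq_flatten]

theorem join_empty_cons (s : String) (l : List String) :
    PySem.Str.join "" (s :: l) = s ++ PySem.Str.join "" l := by
  rw [← String.toList_inj]
  simp [PySem.Str.toList_join, PySem.Chars.join, intercalate_nil_eq_flatten]

-- the tail of B's output: every element with a trailing "A"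
def bodyA (k : Nat) (r : Int) : String :=
  PySem.Str.join "" ((List.replicate k "j" ++ [String.mk [Char.ofNat (0x61 + r).toNat]]).map (fun e => e ++ "A"))

theorem naiveLoop_prefix (n : Nat) : ∀ (num : Int), num.toNat = n → ∀ (op : String) (first : Int),
    naiveLoop num op first = op ++ naiveLoop num "" first := by
  induction n using Nat.strong_induction_on with
  | _ n ih =>
    intro num hn op first
    rw [naiveLoop]
    conv_rhs => rw [naiveLoop]
    by_cases h1 : num > 0
    · by_cases h2 : num > 9
      · simp only [dif_pos h1, if_pos h2]
        have e1 := ih (num - 9).toNat (by omega) (num - 9) rfl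
        by_cases hf : (first == 0) = true
        · simp only [if_pos hf]
          conv_rhs => rw [e1 _ 0]
          rw [e1 _ 0]
          simp [String.append_assoc]
        · simp only [if_neg hf]
          conv_rhs => rw [e1 _ 0]
          rw [e1 _ 0]
          simp [String.append_assoc]
      · simp only [dif_pos h1, if_neg h2]
        have e1 := ih (0 : Int).toNat (by omega) 0 rfl
        by_cases hf : (first == 0) = true
        · simp only [if_pos hf]
          conv_rhs => rw [e1 _ 0]
          rw [e1 _ 0]
          simp [String.append_assoc]
        · simp only [if_neg hf]
          conv_rhs => rw [e1 _ 0]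
          rw [e1 _ 0]
          simp [String.append_assoc]
    · simp [h1]

theorem naiveLoop_zero (k : Nat) : ∀ (r : Int), 0 < r → r ≤ 9 →
    naiveLoop (9 * k + r) "" 0 = bodyA k r := by
  induction k with
  | zero =>
    intro r hr1 hr9
    rw [naiveLoop]
    simp only [Nat.cast_zero, mul_zero, zero_add]
    rw [dif_pos hr1, if_neg (by omega)]
    rw [naiveLoop]
    simp [bodyA, join_empty_cons, join_empty_nil]
  | succ k ih =>
    intro r hr1 hr9
    have hgt : ((9 : Int) * (k + 1 : Nat) + r) > 9 := by omega
    rw [naiveLoop, dif_pos (by omega), if_pos hgt]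
    simp only [beq_self_eq_true, if_pos]
    have harg : ((9 : Int) * (k + 1 : Nat) + r) - 9 = 9 * k + r := by push_cast; ring
    rw [harg, naiveLoop_prefix ((9 : Int) * k + r).toNat _ rfl, ih r hr1 hr9]
    rw [← String.toList_inj]
    simp [bodyA, join_empty_cons, List.replicate_succ]

-- ===== VERDICT (by name: the statement is the Claim_ definition above) =====
theorem naive_num_spec : Claim_equal_naive_num := by
  intro num _
  unfold Spec_naive_num naive_num naive_num_alt
  by_cases hpos : num ≤ 0
  · rw [if_pos hpos, naiveLoop, dif_neg (by omega)]
  · rw [if_neg hpos]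
    have h9 : (0 : Int) < 9 := by norm_num
    have hk : PySem.Int.floordiv (num - 1) 9 = (num - 1) / 9 :=
      PySem.Int.floordiv_eq_ediv_of_pos h9
    set k : Int := PySem.Int.floordiv (num - 1) 9 with hkdef
    set r : Int := num - 9 * k with hrdef
    have hk0 : 0 ≤ k := by omega
    have hr1 : 0 < r := by omega
    have hr9 : r ≤ 9 := by omega
    have hnum : num = 9 * (k.toNat : Int) + r := by omega
    by_cases hsm : num > 9
    · -- at least one "j": first iteration emits "j" with no trailing A, rest is the 0-loop
      have hkpos : 0 < k.toNat := by omega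
      rw [naiveLoop, dif_pos (by omega), if_pos hsm]
      rw [if_neg (by decide)]
      rw [naiveLoop_prefix (num - 9).toNat _ rfl]
      have harg : num - 9 = 9 * ((k.toNat - 1 : Nat) : Int) + r := by omega
      rw [harg, naiveLoop_zero _ r hr1 hr9]
      have hrep : List.replicate k.toNat "j" = "j" :: List.replicate (k.toNat - 1) "j" := by
        cases hkt : k.toNat with
        | zero => omega
        | succ m => simp [List.replicate_succ]
      rw [hrep]
      simp [bodyA]
    · -- single character opcode, no trailing A
      have hkz : k.toNat = 0 := by omega
      rw [naiveLoop, dif_pos (by omega), if_neg hsm]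
      rw [if_neg (by decide)]
      rw [naiveLoop, dif_neg (by omega)]
      have : num = r := by omega
      rw [hkz, this]
      simp [join_empty_nil]
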